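-- pv_equiv track=rewrite | github.com/AnthonnyLucas/Matrizes-e-Recursao-Paradigmas-de-Programa-ao | Solucoes.py | linha_com_maior_soma
-- ===== SOURCE A (Python) =====
-- def linha_com_maior_soma(matriz):
--     indice_maior = 0
--     maior_soma = sum(matriz[0])
--
--     for i in range(1, len(matriz)):
--         soma_atual = sum(matriz[i])
--         if soma_atual > maior_soma:
--             maior_soma = soma_atual
--             indice_maior = i
--     return indice_maior                            # Esperado 1
-- ===== SOURCE B (Python) =====
-- def linha_com_maior_soma(matriz):
--     somas = [sum(linha) for linha in matriz]
--     return somas.index(max(somas))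
-- ===== Notes on version B (the rewrite author's own statement) =====
-- stated objective: simpler
-- what changed: Replaces the manual index loop tracking a running best with a two-phase table-then-argmax: build the list of row sums, then return the index of its first maximum via max()+list.index().
import Mathlib
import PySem

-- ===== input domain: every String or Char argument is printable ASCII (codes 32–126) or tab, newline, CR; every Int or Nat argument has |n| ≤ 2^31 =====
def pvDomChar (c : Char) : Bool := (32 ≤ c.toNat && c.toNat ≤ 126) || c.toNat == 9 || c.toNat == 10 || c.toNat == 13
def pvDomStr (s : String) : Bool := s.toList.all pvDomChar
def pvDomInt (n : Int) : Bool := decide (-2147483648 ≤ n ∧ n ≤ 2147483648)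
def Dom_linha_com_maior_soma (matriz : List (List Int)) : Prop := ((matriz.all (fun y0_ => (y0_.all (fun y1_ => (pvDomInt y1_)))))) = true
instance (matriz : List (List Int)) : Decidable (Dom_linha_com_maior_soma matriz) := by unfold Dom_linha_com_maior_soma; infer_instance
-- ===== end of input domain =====

-- B replaces A's running-best index loop by a two-phase table-then-argmax (row sums list, then
-- first index of its maximum); objective: simpler. Pre_ excludes the empty matrix, where A raises IndexError.


-- ===== PORT A =====
def linha_com_maior_soma (matriz : List (List Int)) : Int :=
  let indice_maior : Int := 0
  let maior_soma : Int := (PySem.List.pyGetD matriz 0 []).sum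
  let st := (PySem.List.pyRange 1 (PySem.List.len matriz)).foldl
    (fun (p : Int × Int) i =>
      let soma_atual := (PySem.List.pyGetD matriz i []).sum
      if p.2 < soma_atual then (i, soma_atual) else p)
    (indice_maior, maior_soma)
  st.1

-- ===== PORT B =====
def linha_com_maior_soma_alt (matriz : List (List Int)) : Int :=
  let somas := matriz.map List.sum
  match PySem.List.max? somas id with
  | none => 0
  | some m =>
    match PySem.List.index? somas m with
    | none => 0
    | some k => (k : Int)

-- ===== PRECONDITION & SPEC =====
-- Pre_ excludes only the empty matrix, on which A raises IndexError (matriz[0]).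
def Pre_linha_com_maior_soma (matriz : List (List Int)) : Prop := matriz ≠ []
instance (matriz : List (List Int)) : Decidable (Pre_linha_com_maior_soma matriz) := by unfold Pre_linha_com_maior_soma; infer_instance
def pvWitness_linha_com_maior_soma : List (List Int) := [[1, 2], [5], [3]]
def Spec_linha_com_maior_soma (matriz : List (List Int)) (out : Int) : Prop := out = linha_com_maior_soma_alt matriz
instance (matriz : List (List Int)) (out : Int) : Decidable (Spec_linha_com_maior_soma matriz out) := by unfold Spec_linha_com_maior_soma; infer_instance

-- ===== CLAIM (what is proved, stated in full; the proofs are below) =====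
def Claim_equal_linha_com_maior_soma : Prop := ∀ (matriz : List (List Int)), Dom_linha_com_maior_soma matriz → Pre_linha_com_maior_soma matriz → Spec_linha_com_maior_soma matriz (linha_com_maior_soma matriz)

-- ===== LEMMAS AND PROOFS =====

-- reference argmax recursion used only by the proofs: state (index of next element, best index, best value)
def pvAmax : List Int → Nat → Nat → Int → Nat × Int
  | [], _, bi, bv => (bi, bv)
  | x :: r, i, bi, bv => if bv < x then pvAmax r (i+1) i x else pvAmax r (i+1) bi bv

lemma pyRange_nil (a b : Int) (h : b ≤ a) : PySem.List.pyRange a b = [] := by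
  unfold PySem.List.pyRange
  simp only [one_ne_zero, ↓reduceIte, one_mul, zero_lt_one, add_sub_cancel_right,
    EuclideanDomain.div_one, List.map_eq_nil_iff, List.range_eq_nil, ite_eq_right_iff,
    Int.toNat_eq_zero, tsub_le_iff_right, zero_add]
  intro; omega

-- A's fold over pyRange equals pvAmax on the suffix
lemma loopA (s : List Int) : ∀ (n a bi : Nat) (bv : Int), s.length = a + n →
    List.foldl (fun (p : Int × Int) i =>
        if p.2 < PySem.List.pyGetD s i 0 then (i, PySem.List.pyGetD s i 0) else p)
      ((bi : Int), bv) (PySem.List.pyRange a (s.length : Int))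
    = (((pvAmax (s.drop a) a bi bv).1 : Int), (pvAmax (s.drop a) a bi bv).2) := by
  intro n
  induction n with
  | zero =>
    intro a bi bv h
    have ha : (s.length : Int) ≤ (a : Int) := by omega
    rw [pyRange_nil _ _ ha, List.drop_eq_nil_of_le (by omega)]
    rfl
  | succ k ih =>
    intro a bi bv h
    have hlt : a < s.length := by omega
    rw [PySem.List.pyRange_one_cons (by exact_mod_cast hlt), List.foldl_cons,
      List.drop_eq_getElem_cons hlt]
    have hget : PySem.List.pyGetD s (a : Int) 0 = s[a] := by
      rw [PySem.List.pyGetD_natCast, List.getD_eq_getElem s 0 hlt]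
    simp only [hget, pvAmax]
    by_cases hx : bv < s[a]
    · simp only [hx, ↓reduceIte]
      have := ih (a + 1) a (s[a]) (by omega)
      push_cast at this ⊢
      exact this
    · simp only [hx, ↓reduceIte]
      have := ih (a + 1) bi bv (by omega)
      push_cast at this ⊢
      exact this

-- pvAmax's best value is the left fold of max
lemma pvAmax_snd : ∀ (t : List Int) (i bi : Nat) (bv : Int),
    (pvAmax t i bi bv).2 = t.foldl (fun m x => if m < x then x else m) bv := by
  intro t
  induction t with
  | nil => intro i bi bv; rfl
  | cons x r ih =>
    intro i bi bv
    simp only [pvAmax, List.foldl]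
    by_cases hx : bv < x
    · simp [hx, ih]
    · simp [hx, ih]

-- Python max over a nonempty list is that fold
lemma max?_cons_fold : ∀ (t : List Int) (m : Int),
    PySem.List.max? (m :: t) (id : Int → Int) = some (t.foldl (fun m x => if m < x then x else m) m) := by
  intro t
  induction t with
  | nil => intro m; rfl
  | cons x r ih =>
    intro m
    by_cases hx : m < x
    · have h1 : PySem.List.max? (m :: x :: r) (id : Int → Int) = PySem.List.max? (x :: r) id := by
        simp [PySem.List.max?, hx]
      rw [h1, ih x]
      simp [hx]
    · have h1 : PySem.List.max? (m :: x :: r) (id : Int → Int) = PySem.List.max? (m :: r) id := by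
        simp [PySem.List.max?, hx]
      rw [h1, ih m]
      simp [hx]

-- invariant for pvAmax: best index in range, points at best value, strictly greater than everything before it
lemma pvAmax_inv (s : List Int) : ∀ (t : List Int) (i bi : Nat) (bv : Int),
    s.drop i = t → bi < i → i ≤ s.length →
    s.getD bi 0 = bv → (∀ j, j < bi → s.getD j 0 < bv) → (∀ j, bi ≤ j → j < i → s.getD j 0 ≤ bv) →
    (pvAmax t i bi bv).1 < s.length ∧ s.getD (pvAmax t i bi bv).1 0 = (pvAmax t i bi bv).2 ∧
      (∀ j, j < (pvAmax t i bi bv).1 → s.getD j 0 < (pvAmax t i bi bv).2) := by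
  intro t
  induction t with
  | nil =>
    intro i bi bv hdrop hbi hi hval hlt hle
    simp only [pvAmax]
    exact ⟨by omega, hval, fun j hj => hlt j hj⟩
  | cons x r ih =>
    intro i bi bv hdrop hbi hi hval hlt hle
    have hilt : i < s.length := by
      by_contra hc
      rw [List.drop_eq_nil_of_le (by omega)] at hdrop
      simp at hdrop
    have hx : s[i] = x := by
      have := List.drop_eq_getElem_cons (l := s) hilt
      rw [hdrop] at this
      exact (List.cons.injEq _ _ _ _ ▸ this).1.symm
    have hr : s.drop (i + 1) = r := by
      have := List.drop_eq_getElem_cons (l := s) hilt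
      rw [hdrop] at this
      exact ((List.cons.injEq _ _ _ _ ▸ this).2).symm
    have hgi : s.getD i 0 = x := by rw [List.getD_eq_getElem s 0 hilt, hx]
    simp only [pvAmax]
    by_cases hbx : bv < x
    · simp only [hbx, ↓reduceIte]
      refine ih (i + 1) i x hr (by omega) (by omega) hgi ?_ ?_
      · intro j hj
        by_cases hjb : j < bi
        · exact lt_trans (hlt j hjb) hbx
        · exact lt_of_le_of_lt (hle j (by omega) hj) hbx
      · intro j h1 h2
        have : j = i := by omega
        subst this; rw [hgi]
    · simp only [hbx, ↓reduceIte]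
      refine ih (i + 1) bi bv hr (by omega) (by omega) hval hlt ?_
      intro j h1 h2
      by_cases hji : j < i
      · exact hle j h1 hji
      · have : j = i := by omega
        subst this; rw [hgi]; omega

-- first-occurrence characterisation of idxOf?
lemma idxOf?_eq_of_first : ∀ (s : List Int) (k : Nat) (v : Int), k < s.length →
    s.getD k 0 = v → (∀ j, j < k → s.getD j 0 ≠ v) → List.idxOf? v s = some k := by
  intro s
  induction s with
  | nil => intro k v hk; simp at hk
  | cons x r ih =>
    intro k v hk hval hne
    match k with
    | 0 =>
      simp only [List.getD_cons_zero] at hval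
      simp [List.idxOf?_cons, hval]
    | k' + 1 =>
      have hx : x ≠ v := by
        have := hne 0 (by omega)
        simpa using this
      rw [List.idxOf?_cons]
      simp only [beq_iff_eq, hx, ↓reduceIte]
      have := ih k' v (by simpa using hk) (by simpa using hval)
        (fun j hj => by have := hne (j + 1) (by omega); simpa using this)
      rw [this]
      rfl

-- ===== VERDICT (by name: the statement is the Claim_ definition above) =====
theorem linha_com_maior_soma_spec : Claim_equal_linha_com_maior_soma := by
  intro matriz _ hpre
  unfold Spec_linha_com_maior_soma
  match matriz with
  | [] => exact absurd rfl hpre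
  | r :: rs =>
    -- the list of row sums
    set s : List Int := (r :: rs).map List.sum with hs
    have hlen : s.length = (r :: rs).length := by simp [hs]
    -- rewrite A's fold to index into s
    have hcongr :
        List.foldl (fun (p : Int × Int) i =>
            if p.2 < (PySem.List.pyGetD (r :: rs) i []).sum
            then (i, (PySem.List.pyGetD (r :: rs) i []).sum) else p)
          ((0 : Int), ((PySem.List.pyGetD (r :: rs) 0 []).sum))
          (PySem.List.pyRange 1 (PySem.List.len (r :: rs)))
        = List.foldl (fun (p : Int × Int) i =>
            if p.2 < PySem.List.pyGetD s i 0 then (i, PySem.List.pyGetD s i 0) else p)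
          ((0 : Int), ((PySem.List.pyGetD (r :: rs) 0 []).sum))
          (PySem.List.pyRange 1 (s.length : Int)) := by
      have hl : PySem.List.len (r :: rs) = (s.length : Int) := by
        simp [PySem.List.len, hs]
      rw [hl]
      apply PySem.List.foldl_congr_mem
      intro acc i hi
      rw [PySem.List.mem_pyRange_one] at hi
      obtain ⟨h1, h2⟩ := hi
      obtain ⟨k, rfl⟩ : ∃ k : Nat, i = (k : Int) := ⟨i.toNat, by omega⟩
      have hk : k < (r :: rs).length := by rw [← hlen]; exact_mod_cast h2
      have hval : (PySem.List.pyGetD (r :: rs) (k : Int) []).sum = PySem.List.pyGetD s (k : Int) 0 := by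
        rw [PySem.List.pyGetD_natCast, PySem.List.pyGetD_natCast,
          List.getD_eq_getElem _ _ hk, List.getD_eq_getElem _ _ (by rw [hlen]; exact hk)]
        exact (List.getElem_map List.sum).symm
      rw [hval]
    have h0 : PySem.List.pyGetD (r :: rs) 0 [] = r := by
      simp [PySem.List.pyGetD_ofNat' (r :: rs) 0 []]
    have hbv : r.sum = s.getD 0 0 := by simp [hs]
    -- A equals pvAmax of the tail of s
    have hA : linha_com_maior_soma (r :: rs)
        = ((pvAmax (s.drop 1) 1 0 r.sum).1 : Int) := by
      show (List.foldl _ _ _ : Int × Int).1 = _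
      rw [hcongr, h0]
      have := loopA s rs.length 1 0 r.sum (by simp [hs]; omega)
      simp only [Nat.cast_one, Nat.cast_zero] at this
      rw [this]
    -- B equals the same index
    set BI := (pvAmax (s.drop 1) 1 0 r.sum).1 with hBI
    set BV := (pvAmax (s.drop 1) 1 0 r.sum).2 with hBV
    have hinv := pvAmax_inv s (s.drop 1) 1 0 r.sum rfl (by omega) (by simp [hs]) hbv.symm
      (by omega) (by intro j _ hj; interval_cases j; exact le_of_eq hbv)
    obtain ⟨hBIlt, hBIval, hBIfirst⟩ := hinv
    have hmax : PySem.List.max? s (id : Int → Int) = some BV := by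
      have hsc : s = r.sum :: (s.drop 1) := by simp [hs]
      rw [hsc, max?_cons_fold, ← pvAmax_snd (s.drop 1) 1 0 r.sum]
    have hidx : PySem.List.index? s BV = some BI := by
      show List.idxOf? BV s = some BI
      exact idxOf?_eq_of_first s BI BV hBIlt hBIval
        (fun j hj => ne_of_lt (hBIfirst j hj))
    have hB : linha_com_maior_soma_alt (r :: rs) = (BI : Int) := by
      show (match PySem.List.max? s (id : Int → Int) with
        | none => (0 : Int)
        | some m =>
          match PySem.List.index? s m with
          | none => (0 : Int)
          | some k => (k : Int)) = (BI : Int)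
      rw [hmax]
      simp only []
      rw [hidx]
    rw [hA, hB]
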